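-- pv_equiv track=rewrite | github.com/quswjdgma83/Python_algorithm | programers/멀리뛰기.py | solution
-- ===== SOURCE A (Python) =====
-- from math import factorial
--
-- def solution(n):
--     answer = 0
--     temp = n
--     dict_a = {}
--     two = 0
--     while temp != -2 and temp != -1:
--         dict_a[temp] = two
--         two += 1
--         temp -= 2
--     for key in dict_a:
--         a = key+dict_a[key]
--         if key == n:
--             answer += 1
--         else:
--             answer += factorial(key+dict_a[key])//(factorial(key)*factorial(dict_a[key]))
--     answer = answer%1234567
--     return answer
-- ===== SOURCE B (Python) =====
-- def solution(n):
--     a, b = 0, 1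
--     for _ in range(n + 1):
--         a, b = b, (a + b) % 1234567
--     return a
-- ===== Notes on version B (the rewrite author's own statement) =====
-- stated objective: faster
-- what changed: Replaced the dict of step-counts plus a sum of exact factorial-quotient binomials (big-integer factorials, one mod at the end) by the standard two-variable iterative Fibonacci recurrence with a mod at every step.
-- outside the precondition, e.g. on solution(-3): A does not finish within the time limit, B returns 0
import Mathlib
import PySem

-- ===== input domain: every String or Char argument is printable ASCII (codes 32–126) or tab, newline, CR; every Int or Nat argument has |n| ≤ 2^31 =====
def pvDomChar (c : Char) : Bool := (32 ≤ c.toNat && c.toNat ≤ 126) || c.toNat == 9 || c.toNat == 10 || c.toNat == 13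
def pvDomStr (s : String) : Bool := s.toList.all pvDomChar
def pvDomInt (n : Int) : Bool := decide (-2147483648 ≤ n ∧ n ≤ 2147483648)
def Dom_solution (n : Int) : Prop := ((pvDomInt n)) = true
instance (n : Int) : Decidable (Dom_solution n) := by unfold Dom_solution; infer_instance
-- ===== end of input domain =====

-- B replaces A's dict of step-counts and sum of exact factorial-quotient binomials by the
-- two-variable iterative Fibonacci recurrence mod 1234567 (measured faster at large n).

-- ===== PORT A =====
-- math.factorial; exact for k ≥ 0 (Python raises ValueError on negatives; A's loop only
-- ever looks up keys ≥ 0 on inputs admitted by Pre_solution).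
def pyFactorial (k : Int) : Int := (Nat.factorial k.toNat : Int)

-- the 'while temp != -2 and temp != -1' loop; fuel n.toNat + 1 covers every n ≥ -2
-- (for n ≤ -3 the Python loop never terminates; Pre_solution excludes those inputs)
def buildLoop : Nat → Int → Int → PySem.Dict Int Int → PySem.Dict Int Int
  | 0, _, _, d => d
  | f + 1, temp, two, d =>
      if temp = -2 ∨ temp = -1 then d
      else buildLoop f (temp - 2) (two + 1) (d.insert temp two)

def solution (n : Int) : Int :=
  let d := buildLoop (n.toNat + 1) n 0 PySem.Dict.empty
  -- 'for key in dict_a:' (the unused Python local 'a = key+dict_a[key]' is dropped)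
  let answer := d.keys.foldl (fun answer key =>
      if key = n then answer + 1
      else answer + PySem.Int.floordiv (pyFactorial (key + PySem.Dict.getD d key 0))
            (pyFactorial key * pyFactorial (PySem.Dict.getD d key 0))) 0
  PySem.Int.mod answer 1234567

-- ===== PORT B =====
def solution_alt (n : Int) : Int :=
  ((PySem.List.pyRange 0 (n + 1) 1).foldl
    (fun (p : Int × Int) _ => (p.2, PySem.Int.mod (p.1 + p.2) 1234567)) (0, 1)).1

-- ===== PRECONDITION & SPEC =====
-- Pre_ excludes exactly n ≤ -3, where Python A's while loop never terminates (no return).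
def Pre_solution (n : Int) : Prop := -2 ≤ n
instance (n : Int) : Decidable (Pre_solution n) := by unfold Pre_solution; infer_instance
def pvWitness_solution : Int := 5

def Spec_solution (n : Int) (out : Int) : Prop := out = solution_alt n
instance (n : Int) (out : Int) : Decidable (Spec_solution n out) := by unfold Spec_solution; infer_instance

-- ===== CLAIM (what is proved, stated in full; the proofs are below) =====
def Claim_equal_solution : Prop := ∀ (n : Int), Dom_solution n → Pre_solution n → Spec_solution n (solution n)

-- ===== LEMMAS AND PROOFS =====

theorem buildLoop_stop (f : Nat) (t two : Int) (d : PySem.Dict Int Int)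
    (h : t = -2 ∨ t = -1) : buildLoop f t two d = d := by
  cases f with
  | zero => rfl
  | succ f => rcases h with h | h <;> subst h <;> simp [buildLoop]

theorem contains_false_of_keys_gt (d : PySem.Dict Int Int) (x : Int)
    (h : ∀ p ∈ d.items, x < p.1) : d.contains x = false := by
  rw [PySem.Dict.contains_eq_decide_mem_keys]
  simp only [decide_eq_false_iff_not, PySem.Dict.keys, List.mem_map]
  rintro ⟨p, hp, rfl⟩
  exact absurd (h p hp) (lt_irrefl _)

-- A's while loop appends the pairs (k - 2i, two + i), i = 0 .. k/2, to the dict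
theorem buildLoop_items (k : Nat) : ∀ (f : Nat) (two : Int) (d : PySem.Dict Int Int),
    k < 2 * f → (∀ p ∈ d.items, (k : Int) < p.1) →
    (buildLoop f (k : Int) two d).items
      = d.items ++ (List.range (k / 2 + 1)).map
          (fun i : Nat => ((k : Int) - 2 * (i : Int), two + (i : Int))) := by
  induction k using Nat.strong_induction_on with
  | _ k ih =>
    intro f two d hf hd
    obtain ⟨f, rfl⟩ : ∃ f', f = f' + 1 := ⟨f - 1, by omega⟩
    have hc : d.contains (k : Int) = false := contains_false_of_keys_gt d _ hd
    match k, hd, hc, ih with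
    | 0, hd, hc, ih =>
      have hcond : ¬((((0:Nat)) : Int) = -2 ∨ (((0:Nat)) : Int) = -1) := by simp
      show (buildLoop (f + 1) ((0:Nat) : Int) two d).items = _
      simp only [buildLoop]
      rw [if_neg hcond]
      rw [show (((0:Nat)) : Int) - 2 = -2 by norm_num, buildLoop_stop f _ _ _ (Or.inl rfl)]
      rw [PySem.Dict.items_insert_of_not_contains _ _ hc]
      norm_num
    | 1, hd, hc, ih =>
      have hcond : ¬((((1:Nat)) : Int) = -2 ∨ (((1:Nat)) : Int) = -1) := by simp
      show (buildLoop (f + 1) ((1:Nat) : Int) two d).items = _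
      simp only [buildLoop]
      rw [if_neg hcond]
      rw [show (((1:Nat)) : Int) - 2 = -1 by norm_num, buildLoop_stop f _ _ _ (Or.inr rfl)]
      rw [PySem.Dict.items_insert_of_not_contains _ _ hc]
      norm_num
    | (k + 2), hd, hc, ih =>
      have hcond : ¬(((k + 2 : Nat) : Int) = -2 ∨ ((k + 2 : Nat) : Int) = -1) := by
        push_cast; omega
      show (buildLoop (f + 1) ((k + 2 : Nat) : Int) two d).items = _
      simp only [buildLoop]
      rw [if_neg hcond]
      have hstep : ((k + 2 : Nat) : Int) - 2 = (k : Int) := by push_cast; ring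
      rw [hstep]
      have hins : (d.insert ((k + 2 : Nat) : Int) two).items
          = d.items ++ [(((k + 2 : Nat) : Int), two)] :=
        PySem.Dict.items_insert_of_not_contains _ _ hc
      have hd' : ∀ p ∈ (d.insert ((k + 2 : Nat) : Int) two).items, (k : Int) < p.1 := by
        intro p hp
        rw [hins, List.mem_append] at hp
        rcases hp with hp | hp
        · have := hd p hp; push_cast at *; omega
        · simp only [List.mem_singleton] at hp; rw [hp]; push_cast; omega
      rw [ih k (by omega) f (two + 1) _ (by omega) hd', hins]
      rw [show (k + 2) / 2 + 1 = (k / 2 + 1) + 1 by omega, List.append_assoc]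
      congr 1
      conv_rhs => rw [List.range_succ_eq_map]
      simp only [List.map_cons, List.map_map]
      rw [List.singleton_append]
      congr 1
      · push_cast; norm_num
      · apply List.map_congr_left
        intro i _
        simp only [Function.comp_apply, Prod.mk.injEq]
        constructor <;> push_cast <;> ring

-- B's loop state after l.length steps
theorem fibFold (l : List Int) : ∀ (k : Nat),
    l.foldl (fun (p : Int × Int) _ => (p.2, PySem.Int.mod (p.1 + p.2) 1234567))
        (((Nat.fib k : Int) % 1234567), ((Nat.fib (k + 1) : Int) % 1234567))
      = (((Nat.fib (k + l.length) : Int) % 1234567),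
         ((Nat.fib (k + l.length + 1) : Int) % 1234567)) := by
  induction l with
  | nil => intro k; simp
  | cons x xs ih =>
    intro k
    have hm : PySem.Int.mod ((Nat.fib k : Int) % 1234567 + (Nat.fib (k+1) : Int) % 1234567) 1234567
        = (Nat.fib (k + 2) : Int) % 1234567 := by
      rw [PySem.Int.mod_eq_emod_of_pos (by norm_num), ← Int.add_emod]
      rw [Nat.fib_add_two]; push_cast; ring_nf
    simp only [List.foldl_cons, hm]
    have := ih (k + 1)
    rw [show k + 1 + 1 = k + 2 from rfl] at this
    rw [this]
    simp only [List.length_cons]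
    ring_nf

-- the diagonal binomial sum A computes is a Fibonacci number
theorem sum_choose_diag (m : Nat) :
    ∑ i ∈ Finset.range (m / 2 + 1), Nat.choose (m - i) i = Nat.fib (m + 1) := by
  symm
  rw [Nat.fib_succ_eq_sum_choose, Finset.Nat.sum_antidiagonal_eq_sum_range_succ_mk,
    ← Finset.sum_range_reflect]
  have hrw : ∀ j ∈ Finset.range (Nat.succ m),
      ((Nat.succ m - 1 - j, m - (Nat.succ m - 1 - j)).1).choose
        ((Nat.succ m - 1 - j, m - (Nat.succ m - 1 - j)).2) = Nat.choose (m - j) j := by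
    intro j hj
    simp only [Finset.mem_range] at hj
    simp only []
    congr 1; omega
  rw [Finset.sum_congr rfl hrw]
  refine (Finset.sum_subset ?_ ?_).symm
  · intro i hi; simp only [Finset.mem_range] at *; omega
  · intro i hi hni
    simp only [Finset.mem_range] at *
    exact Nat.choose_eq_zero_of_lt (by omega)

theorem solution_eq_fib (m : Nat) : solution (m : Int) = (Nat.fib (m + 1) : Int) % 1234567 := by
  unfold solution
  have htn : ((m : Int)).toNat = m := Int.toNat_natCast m
  rw [htn]
  dsimp only
  have hitems : (buildLoop (m + 1) (m : Int) 0 PySem.Dict.empty).items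
      = (List.range (m / 2 + 1)).map
          (fun i : Nat => ((m : Int) - 2 * (i : Int), 0 + (i : Int))) := by
    have := buildLoop_items m (m + 1) 0 PySem.Dict.empty (by omega) (by
      intro p hp; simp [PySem.Dict.empty] at hp)
    simpa [PySem.Dict.empty] using this
  set d := buildLoop (m + 1) (m : Int) 0 PySem.Dict.empty with hd
  have hkeys : d.keys = (List.range (m / 2 + 1)).map (fun i : Nat => (m : Int) - 2 * (i : Int)) := by
    simp only [PySem.Dict.keys, hitems, List.map_map]
    rfl
  have hnodup : d.keys.Nodup := by
    rw [hkeys]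
    exact List.nodup_range.map (fun a b h => by omega)
  have hget : ∀ i < m / 2 + 1, PySem.Dict.getD d ((m : Int) - 2 * (i : Int)) 0 = (i : Int) := by
    intro i hi
    have hmem : ((m : Int) - 2 * (i : Int), 0 + (i : Int)) ∈ d.items := by
      rw [hitems]
      exact List.mem_map.mpr ⟨i, List.mem_range.mpr hi, rfl⟩
    rw [PySem.Dict.getD_of_mem_items d hmem hnodup 0]
    ring
  have hstep : (fun (answer : Int) (key : Int) =>
      if key = (m : Int) then answer + 1
      else answer + PySem.Int.floordiv (pyFactorial (key + PySem.Dict.getD d key 0))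
            (pyFactorial key * pyFactorial (PySem.Dict.getD d key 0)))
      = (fun (answer : Int) (key : Int) => answer +
          (if key = (m : Int) then 1
           else PySem.Int.floordiv (pyFactorial (key + PySem.Dict.getD d key 0))
            (pyFactorial key * pyFactorial (PySem.Dict.getD d key 0)))) := by
    funext a k; split_ifs <;> rfl
  rw [hstep, PySem.List.foldl_add, hkeys, List.map_map]
  have hterm : ∀ i ∈ List.range (m / 2 + 1),
      ((fun key => (if key = (m : Int) then 1
           else PySem.Int.floordiv (pyFactorial (key + PySem.Dict.getD d key 0))
            (pyFactorial key * pyFactorial (PySem.Dict.getD d key 0)))) ∘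
        (fun i : Nat => (m : Int) - 2 * (i : Int))) i
      = ((Nat.choose (m - i) i : Nat) : Int) := by
    intro i hi
    rw [List.mem_range] at hi
    have h2i : 2 * i ≤ m := by omega
    simp only [Function.comp_apply]
    rw [hget i hi]
    by_cases h0 : i = 0
    · subst h0
      rw [if_pos (by push_cast; ring)]
      simp
    · rw [if_neg (by intro h; omega)]
      have hkey : (m : Int) - 2 * (i : Int) = ((m - 2 * i : Nat) : Int) := by omega
      rw [hkey]
      rw [show ((m - 2 * i : Nat) : Int) + (i : Int) = ((m - i : Nat) : Int) by omega]
      unfold pyFactorial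
      simp only [Int.toNat_natCast]
      rw [show ((Nat.factorial (m - 2 * i) : Int) * (Nat.factorial i : Int))
            = ((Nat.factorial (m - 2 * i) * Nat.factorial i : Nat) : Int) by push_cast; ring]
      rw [PySem.Int.floordiv_natCast]
      rw [Nat.choose_eq_factorial_div_factorial (by omega : i ≤ m - i),
        show m - i - i = m - 2 * i by omega, Nat.mul_comm]
  rw [List.map_congr_left hterm]
  have hsum : ((List.range (m / 2 + 1)).map (fun i => ((Nat.choose (m - i) i : Nat) : Int))).sum
      = ((Nat.fib (m + 1) : Nat) : Int) := by
    rw [show ((List.range (m / 2 + 1)).map (fun i => ((Nat.choose (m - i) i : Nat) : Int))).sum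
        = ∑ i ∈ Finset.range (m / 2 + 1), ((Nat.choose (m - i) i : Nat) : Int) from rfl]
    rw [← Nat.cast_sum, sum_choose_diag]
  rw [hsum, PySem.Int.mod_eq_emod_of_pos (by norm_num)]
  norm_num

theorem solution_alt_eq_fib (m : Nat) : solution_alt (m : Int) = (Nat.fib (m + 1) : Int) % 1234567 := by
  unfold solution_alt
  have h0 : ((0 : Int), (1 : Int))
      = (((Nat.fib 0 : Int) % 1234567), ((Nat.fib (0 + 1) : Int) % 1234567)) := by
    norm_num [Nat.fib]
  rw [h0, fibFold]
  have hl : (PySem.List.pyRange 0 ((m : Int) + 1) 1).length = m + 1 := by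
    rw [PySem.List.length_pyRange_one]; omega
  rw [hl]
  simp

-- ===== VERDICT (by name: the statement is the Claim_ definition above) =====
theorem solution_spec : Claim_equal_solution := by
  intro n _ hpre
  unfold Spec_solution
  rcases lt_or_ge n 0 with hneg | hpos
  · have : n = -1 ∨ n = -2 := by unfold Pre_solution at hpre; omega
    rcases this with h | h <;> subst h <;> decide
  · obtain ⟨m, rfl⟩ := Int.eq_ofNat_of_zero_le hpos
    rw [solution_eq_fib, solution_alt_eq_fib]
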